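-- pv_equiv track=rewrite | github.com/JeonJe/Algorithm | COS(Professional Coding Specialist) python/1급/2차/2차 1급 3_initial_code.py | solution
-- ===== SOURCE A (Python) =====
-- def func_a(n):
--     ret = 1
--     while n > 0:
--         ret *= 10
--         n -= 1
--     return ret
--
-- def func_b(n):
--     ret = 0
--     while n > 0:
--         ret += 1
--         n //= 10
--     return ret
--
-- def func_c(n):
--     ret = 0
--     while n > 0:
--         ret += n%10
--         n //= 10
--     return ret
--
-- def solution(num):
--     next_num = num
--     while True:
--         next_num += 1 # 게시글 번호를 1 증가시키고
--         length = func_b(next_num) # 자리수 구하기 O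
--         if length % 2:
--             continue
--
--         divisor = func_a(length//2)  # 앞 자리수 절반과 뒷 자리 절반 분리하기
--         front = next_num // divisor  # 6자리 일경우 func_a(3) : 10 -> 100-> 1000 이 divisor가 됨
--         back = next_num % divisor
--
--         front_sum = func_c(front)
--         back_sum = func_c(back)
--         if front_sum == back_sum:
--             break
--
--     return next_num - num
-- ===== SOURCE B (Python) =====
-- def _len(n):
--     L = 0
--     while n > 0:
--         L += 1
--         n //= 10
--     return L
--
-- def _dsum(n):
--     s = 0
--     while n > 0:
--         s += n % 10
--         n //= 10
--     return s
--
-- def _min_sum(h, s):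
--     # minimal h-digit string (leading zeros allowed) read as a number with digit sum s; requires 0 <= s <= 9*h
--     q, r = divmod(s, 9)
--     if r == 0:
--         return 10**q - 1
--     return (r + 1) * 10**q - 1
--
-- def _min_at_least(b0, h, s):
--     # minimal x with b0 <= x < 10**h and digit sum s, or None
--     if s < 0 or s > 9 * h:
--         return None
--     if h == 0:
--         return 0
--     p = 10**(h - 1)
--     top, rest = divmod(b0, p)
--     r = _min_at_least(rest, h - 1, s - top)
--     if r is not None:
--         return top * p + r
--     d = top + 1 if top + 1 > s - 9 * (h - 1) else s - 9 * (h - 1)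
--     if d <= 9 and d <= s:
--         return d * p + _min_sum(h - 1, s - d)
--     return None
--
-- def solution(num):
--     lo = num + 1
--     if lo <= 0:
--         # a nonpositive number has an empty digit string, so its halves trivially balance
--         return 1
--     L = _len(lo)
--     if L % 2 == 1:
--         # no odd-length number balances; smallest balanced (L+1)-digit number is 10**L + 1
--         return 10**L + 1 - num
--     h = L // 2
--     p = 10**h
--     front, b0 = divmod(lo, p)
--     back = _min_at_least(b0, h, _dsum(front))
--     if back is not None:
--         return front * p + back - num
--     front += 1
--     if front == p:
--         # overflow past all L-digit numbers; smallest balanced (L+2)-digit number is 10**(L+1) + 1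
--         return 10**(L + 1) + 1 - num
--     return front * p + _min_sum(h, _dsum(front)) - num
-- ===== Notes on version B (the rewrite author's own statement) =====
-- stated objective: faster
-- what changed: A scans candidates one by one (num+1, num+2, ...) re-deriving digit length and half digit sums for each until the halves balance; B constructs the next balanced even-length number directly by a greedy digit construction on the halves (keep the front half and greedily build the minimal admissible back half, otherwise bump the front half or jump to the next even length), doing O(digits) work instead of a scan.
import Mathlib
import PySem

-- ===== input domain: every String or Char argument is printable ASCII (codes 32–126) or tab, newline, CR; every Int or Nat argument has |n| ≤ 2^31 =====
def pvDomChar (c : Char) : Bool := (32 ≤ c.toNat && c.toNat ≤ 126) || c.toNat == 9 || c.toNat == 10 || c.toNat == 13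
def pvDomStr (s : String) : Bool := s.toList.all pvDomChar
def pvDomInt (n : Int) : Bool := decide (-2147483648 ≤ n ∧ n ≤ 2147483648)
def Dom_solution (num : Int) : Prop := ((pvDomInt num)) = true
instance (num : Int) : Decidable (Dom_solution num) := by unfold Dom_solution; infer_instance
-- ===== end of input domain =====

-- B replaces A's one-by-one scan for the next half-sum-balanced even-length number by a direct
-- greedy digit construction of that number (objective: faster, asymptotic).

-- ===== PORT A =====
def funcALoop (n ret : Int) : Int :=
  if _h : n > 0 then funcALoop (n - 1) (ret * 10) else ret
termination_by n.toNat
decreasing_by omega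

def func_a (n : Int) : Int := funcALoop n 1

def funcBLoop (n ret : Int) : Int :=
  if _h : n > 0 then funcBLoop (PySem.Int.floordiv n 10) (ret + 1) else ret
termination_by n.toNat
decreasing_by
  rw [PySem.Int.floordiv_eq_ediv_of_pos (by norm_num)]
  omega

def func_b (n : Int) : Int := funcBLoop n 0

def funcCLoop (n ret : Int) : Int :=
  if _h : n > 0 then funcCLoop (PySem.Int.floordiv n 10) (ret + PySem.Int.mod n 10) else ret
termination_by n.toNat
decreasing_by
  rw [PySem.Int.floordiv_eq_ediv_of_pos (by norm_num)]
  omega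

def func_c (n : Int) : Int := funcCLoop n 0

-- A's `while True` search, fueled: the fuel is a guard making the recursion total, it is
-- never exhausted on the domain (proved below); on exhaustion it returns the running value.
def solLoop (num nxt : Int) : Nat → Int
  | 0 => nxt - num
  | fuel + 1 =>
    let nxt' := nxt + 1
    let length := func_b nxt'
    if PySem.Int.mod length 2 ≠ 0 then solLoop num nxt' fuel
    else
      let divisor := func_a (PySem.Int.floordiv length 2)
      let front := PySem.Int.floordiv nxt' divisor
      let back := PySem.Int.mod nxt' divisor
      if func_c front = func_c back then nxt' - num else solLoop num nxt' fuel

def solution (num : Int) : Int := solLoop num num ((10 ^ 12 : Int) - num).toNat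

-- ===== PORT B =====
def bLenLoop (n L : Int) : Int :=
  if _h : n > 0 then bLenLoop (PySem.Int.floordiv n 10) (L + 1) else L
termination_by n.toNat
decreasing_by
  rw [PySem.Int.floordiv_eq_ediv_of_pos (by norm_num)]
  omega

def bLen (n : Int) : Int := bLenLoop n 0

def bDsumLoop (n s : Int) : Int :=
  if _h : n > 0 then bDsumLoop (PySem.Int.floordiv n 10) (s + PySem.Int.mod n 10) else s
termination_by n.toNat
decreasing_by
  rw [PySem.Int.floordiv_eq_ediv_of_pos (by norm_num)]
  omega

def bDsum (n : Int) : Int := bDsumLoop n 0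

-- minimal h-digit string (leading zeros allowed) with digit sum s; Source B only calls it with
-- 0 ≤ s ≤ 9*h, where `10**q` has a nonnegative exponent, so `.toNat` on the exponent is exact
def bMinSum (h s : Int) : Int :=
  let q := PySem.Int.floordiv s 9
  let r := PySem.Int.mod s 9
  if r = 0 then 10 ^ q.toNat - 1 else (r + 1) * 10 ^ q.toNat - 1

def bMinAtLeast (b0 h s : Int) : Option Int :=
  if s < 0 ∨ s > 9 * h then none
  else if h = 0 then some 0
  else
    let p : Int := 10 ^ (h - 1).toNat
    let top := PySem.Int.floordiv b0 p
    let rest := PySem.Int.mod b0 p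
    match bMinAtLeast rest (h - 1) (s - top) with
    | some r => some (top * p + r)
    | none =>
      let d := if top + 1 > s - 9 * (h - 1) then top + 1 else s - 9 * (h - 1)
      if d ≤ 9 ∧ d ≤ s then some (d * p + bMinSum (h - 1) (s - d)) else none
termination_by h.toNat
decreasing_by omega

def solution_alt (num : Int) : Int :=
  let lo := num + 1
  if lo ≤ 0 then 1
  else
    let L := bLen lo
    if PySem.Int.mod L 2 = 1 then 10 ^ L.toNat + 1 - num
    else
      let h := PySem.Int.floordiv L 2
      let p : Int := 10 ^ h.toNat
      let front := PySem.Int.floordiv lo p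
      let b0 := PySem.Int.mod lo p
      match bMinAtLeast b0 h (bDsum front) with
      | some back => front * p + back - num
      | none =>
        let front' := front + 1
        if front' = p then 10 ^ (L + 1).toNat + 1 - num
        else front' * p + bMinSum h (bDsum front') - num

-- ===== PRECONDITION & SPEC =====
def Spec_solution (num : Int) (out : Int) : Prop := out = solution_alt num
instance (num : Int) (out : Int) : Decidable (Spec_solution num out) := by unfold Spec_solution; infer_instance

-- ===== CLAIM (what is proved, stated in full; the proofs are below) =====
def Claim_equal_solution : Prop := ∀ (num : Int), Dom_solution num → Spec_solution num (solution num)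

-- ===== LEMMAS AND PROOFS =====

-- Nat-level digit length and digit sum used by the proofs
def dsN (n : Nat) : Nat :=
  if n = 0 then 0 else n % 10 + dsN (n / 10)
termination_by n
decreasing_by omega

def lenN (n : Nat) : Nat :=
  if n = 0 then 0 else lenN (n / 10) + 1
termination_by n
decreasing_by omega

theorem dsN_zero : dsN 0 = 0 := by rw [dsN]; simp

theorem dsN_step (n : Nat) (h : 0 < n) : dsN n = n % 10 + dsN (n / 10) := by
  rw [dsN]; simp [Nat.pos_iff_ne_zero.mp h]

theorem dsN_small (n : Nat) (h : n < 10) : dsN n = n := by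
  rcases Nat.eq_zero_or_pos n with h0 | h0
  · simp [h0, dsN_zero]
  · rw [dsN_step n h0, Nat.mod_eq_of_lt h, Nat.div_eq_of_lt h, dsN_zero]; omega

theorem dsN_le (h : Nat) : ∀ n : Nat, n < 10 ^ h → dsN n ≤ 9 * h := by
  induction h with
  | zero => intro n hn; interval_cases n; simp [dsN_zero]
  | succ k ih =>
    intro n hn
    rcases Nat.eq_zero_or_pos n with h0 | h0
    · simp [h0, dsN_zero]
    · rw [dsN_step n h0]
      have h1 : n / 10 < 10 ^ k := by
        rw [Nat.div_lt_iff_lt_mul (by norm_num)]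
        calc n < 10 ^ (k + 1) := hn
        _ = 10 ^ k * 10 := by ring
      have := ih (n / 10) h1
      have := Nat.mod_lt n (show 0 < 10 by norm_num)
      omega

theorem dsN_split (h : Nat) : ∀ a b : Nat, b < 10 ^ h →
    dsN (a * 10 ^ h + b) = dsN a + dsN b := by
  induction h with
  | zero => intro a b hb; interval_cases b; simp [dsN_zero]
  | succ k ih =>
    intro a b hb
    rcases Nat.eq_zero_or_pos (a * 10 ^ (k + 1) + b) with h0 | h0
    · have ha : a = 0 := by
        by_contra hne
        have : 10 ^ (k+1) ≤ a * 10 ^ (k+1) := Nat.le_mul_of_pos_left _ (by omega)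
        omega
      have hb0 : b = 0 := by omega
      simp [ha, hb0, dsN_zero]
    · rw [dsN_step _ h0]
      have hm : (a * 10 ^ (k + 1) + b) % 10 = b % 10 := by
        have : a * 10 ^ (k + 1) = (a * 10 ^ k) * 10 := by ring
        omega
      have hd : (a * 10 ^ (k + 1) + b) / 10 = a * 10 ^ k + b / 10 := by
        have h1 : a * 10 ^ (k + 1) + b = (a * 10 ^ k) * 10 + b := by ring_nf
        omega
      rw [hm, hd, ih a (b / 10) (by
        rw [Nat.div_lt_iff_lt_mul (by norm_num)]
        calc b < 10 ^ (k + 1) := hb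
        _ = 10 ^ k * 10 := by ring)]
      rcases Nat.eq_zero_or_pos b with hb0 | hb0
      · simp [hb0, dsN_zero]
      · rw [dsN_step b hb0]; omega

theorem dsN_nines (h : Nat) : dsN (10 ^ h - 1) = 9 * h := by
  induction h with
  | zero => simp [dsN_zero]
  | succ k ih =>
    have h1 : (0:Nat) < 10 ^ (k + 1) - 1 := by
      have : (10:Nat) ^ 1 ≤ 10 ^ (k+1) := Nat.pow_le_pow_right (by norm_num) (by omega)
      simp at this; omega
    rw [dsN_step _ h1]
    have hp : (1:Nat) ≤ 10 ^ k := Nat.one_le_pow _ _ (by norm_num)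
    have he : 10 ^ (k + 1) - 1 = 9 * 10 ^ k + (10 ^ k - 1) := by
      have : 10 ^ (k+1) = 10 * 10 ^ k := by ring
      omega
    have he2 : 10 ^ (k + 1) - 1 = 10 * (10 ^ k - 1) + 9 := by
      have : (10:Nat) ^ (k+1) = 10 * 10 ^ k := by ring
      omega
    have hm : (10 ^ (k + 1) - 1) % 10 = 9 := by omega
    have hd : (10 ^ (k + 1) - 1) / 10 = 10 ^ k - 1 := by omega
    rw [hm, hd, ih]; ring

theorem dsN_max (h : Nat) : ∀ n : Nat, n < 10 ^ h → dsN n = 9 * h → n = 10 ^ h - 1 := by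
  induction h with
  | zero => intro n hn _; omega
  | succ k ih =>
    intro n hn hd
    have h0 : 0 < n := by
      rcases Nat.eq_zero_or_pos n with h0 | h0
      · rw [h0, dsN_zero] at hd; omega
      · exact h0
    rw [dsN_step n h0] at hd
    have h1 : n / 10 < 10 ^ k := by
      rw [Nat.div_lt_iff_lt_mul (by norm_num)]
      calc n < 10 ^ (k + 1) := hn
      _ = 10 ^ k * 10 := by ring
    have h2 := dsN_le k (n / 10) h1
    have h3 : n % 10 < 10 := Nat.mod_lt n (by norm_num)
    have h4 : n % 10 = 9 := by omega
    have h5 : dsN (n / 10) = 9 * k := by omega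
    have h6 := ih (n / 10) h1 h5
    have hp : (1:Nat) ≤ 10 ^ k := Nat.one_le_pow _ _ (by norm_num)
    have : n = 10 * (n / 10) + n % 10 := by omega
    rw [h4, h6] at this
    have : n = 10 * (10 ^ k - 1) + 9 := this
    have hh : (10:Nat) ^ (k+1) = 10 * 10 ^ k := by ring
    omega

theorem lenN_zero : lenN 0 = 0 := by rw [lenN]; simp

theorem lenN_step (n : Nat) (h : 0 < n) : lenN n = lenN (n / 10) + 1 := by
  rw [lenN]; simp [Nat.pos_iff_ne_zero.mp h]

theorem lenN_lt_pow (n : Nat) : n < 10 ^ lenN n := by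
  induction n using Nat.strong_induction_on with
  | _ n ih =>
    rcases Nat.eq_zero_or_pos n with h0 | h0
    · simp [h0, lenN_zero]
    · rw [lenN_step n h0]
      have := ih (n / 10) (by omega)
      have : n / 10 < 10 ^ lenN (n / 10) := this
      have h2 : n < 10 * (n / 10) + 10 := by omega
      calc n < 10 * 10 ^ lenN (n / 10) := by omega
      _ = 10 ^ (lenN (n / 10) + 1) := by ring

theorem lenN_pos (n : Nat) (h : 0 < n) : 0 < lenN n := by
  rw [lenN_step n h]; omega

theorem lenN_pow_le (n : Nat) (h : 0 < n) : 10 ^ (lenN n - 1) ≤ n := by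
  induction n using Nat.strong_induction_on with
  | _ n ih =>
    rw [lenN_step n h]
    rcases Nat.eq_zero_or_pos (n / 10) with h0 | h0
    · rw [h0, lenN_zero]
      simp
      omega
    · have := ih (n / 10) (by omega) h0
      have hp := lenN_pos (n / 10) h0
      have he : lenN (n / 10) + 1 - 1 = (lenN (n / 10) - 1) + 1 := by omega
      rw [he, pow_succ]
      have : 10 ^ (lenN (n / 10) - 1) * 10 ≤ (n / 10) * 10 := by omega
      omega

theorem lenN_unique (n k : Nat) (hk : 1 ≤ k) (h1 : 10 ^ (k - 1) ≤ n) (h2 : n < 10 ^ k) :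
    lenN n = k := by
  have hn : 0 < n := by
    have : (1:Nat) ≤ 10 ^ (k-1) := Nat.one_le_pow _ _ (by norm_num)
    omega
  by_contra hne
  rcases Nat.lt_or_ge (lenN n) k with hlt | hge
  · have : 10 ^ lenN n ≤ 10 ^ (k - 1) := Nat.pow_le_pow_right (by norm_num) (by omega)
    have := lenN_lt_pow n
    omega
  · have hgt : k < lenN n := by omega
    have : 10 ^ k ≤ 10 ^ (lenN n - 1) := Nat.pow_le_pow_right (by norm_num) (by omega)
    have := lenN_pow_le n hn
    omega
theorem funcALoop_natCast (k : Nat) : ∀ r : Int, funcALoop (↑k) r = r * 10 ^ k := by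
  induction k with
  | zero => intro r; rw [funcALoop]; simp
  | succ m ih =>
    intro r
    rw [funcALoop]
    have hc : ((m + 1 : Nat) : Int) > 0 := by positivity
    simp only [hc, dif_pos]
    have ha : ((m + 1 : Nat) : Int) - 1 = (m : Nat) := by push_cast; ring
    rw [ha, ih]
    push_cast; ring

theorem func_a_natCast (k : Nat) : func_a (↑k) = ((10 ^ k : Nat) : Int) := by
  rw [func_a, funcALoop_natCast]; push_cast; ring

theorem funcBLoop_nonpos (n r : Int) (h : n ≤ 0) : funcBLoop n r = r := by
  rw [funcBLoop]; simp [show ¬(n > 0) by omega]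

theorem funcBLoop_natCast (n : Nat) : ∀ r : Int, funcBLoop (↑n) r = r + ↑(lenN n) := by
  induction n using Nat.strong_induction_on with
  | _ n ih =>
    intro r
    rcases Nat.eq_zero_or_pos n with h0 | h0
    · rw [h0, funcBLoop_nonpos _ _ (by norm_num), lenN_zero]; simp
    · rw [funcBLoop]
      have hc : ((n : Nat) : Int) > 0 := by exact_mod_cast h0
      simp only [hc, dif_pos]
      have ha : PySem.Int.floordiv (↑n) 10 = ((n / 10 : Nat) : Int) := by
        exact_mod_cast PySem.Int.floordiv_natCast n 10
      rw [ha, ih (n / 10) (by omega), lenN_step n h0]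
      push_cast; ring

theorem func_b_natCast (n : Nat) : func_b (↑n) = ↑(lenN n) := by
  rw [func_b, funcBLoop_natCast]; ring

theorem func_b_nonpos (n : Int) (h : n ≤ 0) : func_b n = 0 := by
  rw [func_b, funcBLoop_nonpos _ _ h]

theorem funcCLoop_nonpos (n r : Int) (h : n ≤ 0) : funcCLoop n r = r := by
  rw [funcCLoop]; simp [show ¬(n > 0) by omega]

theorem funcCLoop_natCast (n : Nat) : ∀ r : Int, funcCLoop (↑n) r = r + ↑(dsN n) := by
  induction n using Nat.strong_induction_on with
  | _ n ih =>
    intro r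
    rcases Nat.eq_zero_or_pos n with h0 | h0
    · rw [h0, funcCLoop_nonpos _ _ (by norm_num), dsN_zero]; simp
    · rw [funcCLoop]
      have hc : ((n : Nat) : Int) > 0 := by exact_mod_cast h0
      simp only [hc, dif_pos]
      have ha : PySem.Int.floordiv (↑n) 10 = ((n / 10 : Nat) : Int) := by
        exact_mod_cast PySem.Int.floordiv_natCast n 10
      have hb : PySem.Int.mod (↑n) 10 = ((n % 10 : Nat) : Int) := by
        exact_mod_cast PySem.Int.mod_natCast n 10
      rw [ha, hb, ih (n / 10) (by omega), dsN_step n h0]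
      push_cast; ring

theorem func_c_natCast (n : Nat) : func_c (↑n) = ↑(dsN n) := by
  rw [func_c, funcCLoop_natCast]; ring

theorem func_c_nonpos (n : Int) (h : n ≤ 0) : func_c n = 0 := by
  rw [func_c, funcCLoop_nonpos _ _ h]

theorem bLenLoop_nonpos (n r : Int) (h : n ≤ 0) : bLenLoop n r = r := by
  rw [bLenLoop]; simp [show ¬(n > 0) by omega]

theorem bLenLoop_natCast (n : Nat) : ∀ r : Int, bLenLoop (↑n) r = r + ↑(lenN n) := by
  induction n using Nat.strong_induction_on with
  | _ n ih =>
    intro r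
    rcases Nat.eq_zero_or_pos n with h0 | h0
    · rw [h0, bLenLoop_nonpos _ _ (by norm_num), lenN_zero]; simp
    · rw [bLenLoop]
      have hc : ((n : Nat) : Int) > 0 := by exact_mod_cast h0
      simp only [hc, dif_pos]
      have ha : PySem.Int.floordiv (↑n) 10 = ((n / 10 : Nat) : Int) := by
        exact_mod_cast PySem.Int.floordiv_natCast n 10
      rw [ha, ih (n / 10) (by omega), lenN_step n h0]
      push_cast; ring

theorem bLen_natCast (n : Nat) : bLen (↑n) = ↑(lenN n) := by
  rw [bLen, bLenLoop_natCast]; ring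

theorem bDsumLoop_nonpos (n r : Int) (h : n ≤ 0) : bDsumLoop n r = r := by
  rw [bDsumLoop]; simp [show ¬(n > 0) by omega]

theorem bDsumLoop_natCast (n : Nat) : ∀ r : Int, bDsumLoop (↑n) r = r + ↑(dsN n) := by
  induction n using Nat.strong_induction_on with
  | _ n ih =>
    intro r
    rcases Nat.eq_zero_or_pos n with h0 | h0
    · rw [h0, bDsumLoop_nonpos _ _ (by norm_num), dsN_zero]; simp
    · rw [bDsumLoop]
      have hc : ((n : Nat) : Int) > 0 := by exact_mod_cast h0
      simp only [hc, dif_pos]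
      have ha : PySem.Int.floordiv (↑n) 10 = ((n / 10 : Nat) : Int) := by
        exact_mod_cast PySem.Int.floordiv_natCast n 10
      have hb : PySem.Int.mod (↑n) 10 = ((n % 10 : Nat) : Int) := by
        exact_mod_cast PySem.Int.mod_natCast n 10
      rw [ha, hb, ih (n / 10) (by omega), dsN_step n h0]
      push_cast; ring

theorem bDsum_natCast (n : Nat) : bDsum (↑n) = ↑(dsN n) := by
  rw [bDsum, bDsumLoop_natCast]; ring
theorem bMinSum_spec (h s : Nat) (hs : s ≤ 9 * h) :
    ∃ m : Nat, bMinSum (↑h) (↑s) = ↑m ∧ m < 10 ^ h ∧ dsN m = s ∧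
      ∀ y : Nat, y < m → dsN y ≠ s := by
  have hq : PySem.Int.floordiv (↑s) 9 = ((s / 9 : Nat) : Int) := by
    exact_mod_cast PySem.Int.floordiv_natCast s 9
  have hr : PySem.Int.mod (↑s) 9 = ((s % 9 : Nat) : Int) := by
    exact_mod_cast PySem.Int.mod_natCast s 9
  have hq9 : s / 9 ≤ h := by omega
  have hone : (1:Nat) ≤ 10 ^ (s / 9) := Nat.one_le_pow _ _ (by norm_num)
  rw [bMinSum, hq, hr]
  simp only [Int.toNat_natCast]
  by_cases h0 : s % 9 = 0
  · refine ⟨10 ^ (s / 9) - 1, ?_, ?_, ?_, ?_⟩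
    · simp [h0]
    · calc 10 ^ (s / 9) - 1 < 10 ^ (s / 9) := by omega
      _ ≤ 10 ^ h := Nat.pow_le_pow_right (by norm_num) hq9
    · rw [dsN_nines]; omega
    · intro y hy hds
      have hylt : y < 10 ^ (s / 9) := by omega
      have : y = 10 ^ (s / 9) - 1 := dsN_max _ y hylt (by omega)
      omega
  · have hqlt : s / 9 < h := by
      rcases Nat.lt_or_ge (s / 9) h with h1 | h1
      · exact h1
      · have : s / 9 = h := by omega
        omega
    refine ⟨(s % 9 + 1) * 10 ^ (s / 9) - 1, ?_, ?_, ?_, ?_⟩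
    · simp [h0]
    · have h9 : s % 9 + 1 ≤ 10 := by omega
      have hge1 : (1:Nat) ≤ (s % 9 + 1) * 10 ^ (s / 9) := by
        have : 0 < (s % 9 + 1) * 10 ^ (s / 9) := by positivity
        omega
      calc (s % 9 + 1) * 10 ^ (s / 9) - 1 < (s % 9 + 1) * 10 ^ (s / 9) := by omega
      _ ≤ 10 * 10 ^ (s / 9) := by
            exact Nat.mul_le_mul_right _ h9
      _ = 10 ^ (s / 9 + 1) := by ring
      _ ≤ 10 ^ h := Nat.pow_le_pow_right (by norm_num) (by omega)
    · have he : (s % 9 + 1) * 10 ^ (s / 9) - 1 = (s % 9) * 10 ^ (s / 9) + (10 ^ (s / 9) - 1) := by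
        have : (s % 9 + 1) * 10 ^ (s / 9) = (s % 9) * 10 ^ (s / 9) + 10 ^ (s / 9) := by ring
        omega
      rw [he, dsN_split _ _ _ (by omega), dsN_nines, dsN_small _ (by omega)]
      omega
    · intro y hy hds
      set q := s / 9 with hqdef
      have hsplit := dsN_split q (y / 10 ^ q) (y % 10 ^ q) (Nat.mod_lt y (by positivity))
      rw [Nat.div_add_mod'] at hsplit
      have ht : y / 10 ^ q < s % 9 + 1 :=
        (Nat.div_lt_iff_lt_mul (show 0 < 10 ^ q by positivity)).mpr (by omega)
      have hu := dsN_le q (y % 10 ^ q) (Nat.mod_lt y (by positivity))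
      rcases Nat.lt_or_ge (y / 10 ^ q) (s % 9) with hlt | hge
      · have : dsN (y / 10 ^ q) = y / 10 ^ q := dsN_small _ (by omega)
        omega
      · have hteq : y / 10 ^ q = s % 9 := by omega
        have hds_t : dsN (y / 10 ^ q) = s % 9 := by rw [hteq]; exact dsN_small _ (by omega)
        have hdu : dsN (y % 10 ^ q) = 9 * q := by omega
        have hu9 := dsN_max q (y % 10 ^ q) (Nat.mod_lt y (by positivity)) hdu
        have hdm := Nat.div_add_mod' y (10 ^ q)
        rw [hteq, hu9] at hdm
        have hexp : (s % 9 + 1) * 10 ^ q = (s % 9) * 10 ^ q + 10 ^ q := by ring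
        omega
theorem bMinAtLeast_neg (b0 h s : Int) (hs : s < 0) : bMinAtLeast b0 h s = none := by
  rw [bMinAtLeast]; simp [hs]

theorem bMinAtLeast_succ (hn b0 s : Nat) (hs : s ≤ 9 * (hn + 1)) :
    bMinAtLeast (↑b0) (↑(hn + 1)) (↑s) =
      (match bMinAtLeast (↑(b0 % 10 ^ hn)) (↑hn) ((s : Int) - ↑(b0 / 10 ^ hn)) with
       | some r => some (↑(b0 / 10 ^ hn) * ((10 ^ hn : Nat) : Int) + r)
       | none =>
         let d : Int := if (↑(b0 / 10 ^ hn) : Int) + 1 > ↑s - 9 * ↑hn then (↑(b0 / 10 ^ hn) : Int) + 1 else ↑s - 9 * ↑hn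
         if d ≤ 9 ∧ d ≤ (s : Int) then some (d * ((10 ^ hn : Nat) : Int) + bMinSum (↑hn) (↑s - d)) else none) := by
  rw [bMinAtLeast]
  have hguard : ¬((s : Int) < 0 ∨ (s : Int) > 9 * ↑(hn + 1)) := by
    push_neg
    constructor
    · positivity
    · exact_mod_cast hs
  have hne : ((hn + 1 : Nat) : Int) ≠ 0 := by positivity
  rw [if_neg hguard, if_neg hne]
  have h1 : ((hn + 1 : Nat) : Int) - 1 = (hn : Int) := by push_cast; ring
  have h2 : (((hn : Int)).toNat) = hn := Int.toNat_natCast hn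
  have hp : (10 : Int) ^ ((((hn + 1 : Nat) : Int) - 1).toNat) = ((10 ^ hn : Nat) : Int) := by
    rw [h1, h2]; push_cast; ring
  simp only [hp]
  have htop : PySem.Int.floordiv (↑b0) ((10 ^ hn : Nat) : Int) = ((b0 / 10 ^ hn : Nat) : Int) :=
    PySem.Int.floordiv_natCast b0 (10 ^ hn)
  have hrest : PySem.Int.mod (↑b0) ((10 ^ hn : Nat) : Int) = ((b0 % 10 ^ hn : Nat) : Int) :=
    PySem.Int.mod_natCast b0 (10 ^ hn)
  simp only [htop, hrest, h1]

theorem split_digit (hn y : Nat) (hy : y < 10 ^ (hn + 1)) :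
    dsN y = y / 10 ^ hn + dsN (y % 10 ^ hn) ∧ y / 10 ^ hn ≤ 9 := by
  have hsplit := dsN_split hn (y / 10 ^ hn) (y % 10 ^ hn) (Nat.mod_lt y (by positivity))
  rw [Nat.div_add_mod'] at hsplit
  have h2 : y < 10 * 10 ^ hn := by
    have hh : (10:Nat) ^ (hn + 1) = 10 * 10 ^ hn := by ring
    omega
  have h3 : y / 10 ^ hn < 10 :=
    (Nat.div_lt_iff_lt_mul (show 0 < 10 ^ hn by positivity)).mpr (by omega)
  exact ⟨by rw [hsplit, dsN_small _ h3], by omega⟩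

theorem bMinAtLeast_spec : ∀ (h : Nat) (b0 s : Nat), b0 < 10 ^ h →
    (∀ x : Int, bMinAtLeast (↑b0) (↑h) (↑s) = some x →
      ∃ xn : Nat, x = ↑xn ∧ b0 ≤ xn ∧ xn < 10 ^ h ∧ dsN xn = s ∧
        ∀ y : Nat, b0 ≤ y → y < xn → dsN y ≠ s)
    ∧ (bMinAtLeast (↑b0) (↑h) (↑s) = none → ∀ y : Nat, b0 ≤ y → y < 10 ^ h → dsN y ≠ s) := by
  intro h
  induction h with
  | zero =>
    intro b0 s hb
    have hb0 : b0 = 0 := by simpa using Nat.lt_one_iff.mp hb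
    subst hb0
    by_cases hs : s = 0
    · subst hs
      have hval : bMinAtLeast (((0:Nat)):Int) (((0:Nat)):Int) (((0:Nat)):Int) = some 0 := by
        rw [bMinAtLeast]; norm_num
      constructor
      · intro x hx
        rw [hval] at hx
        obtain rfl : (0 : Int) = x := Option.some.inj hx
        refine ⟨0, by norm_num, by omega, by norm_num, by simp [dsN_zero], ?_⟩
        intro y h1 h2
        omega
      · intro hx
        rw [hval] at hx
        exact absurd hx (by simp)
    · rw [bMinAtLeast]
      have : ((s : Int) < 0 ∨ (s : Int) > 9 * ((0 : Nat) : Int)) := by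
        right; push_cast; omega
      rw [if_pos this]
      constructor
      · intro x hx; exact absurd hx (by simp)
      · intro _ y hy1 hy2
        have hy0 : y = 0 := by
          have : (10:Nat) ^ 0 = 1 := by norm_num
          omega
        subst hy0; rw [dsN_zero]; omega
  | succ hn ih =>
    intro b0 s hb
    by_cases hs9 : s ≤ 9 * (hn + 1)
    swap
    · rw [bMinAtLeast]
      have : ((s : Int) < 0 ∨ (s : Int) > 9 * ((hn + 1 : Nat) : Int)) := by
        right; push_cast; omega
      rw [if_pos this]
      constructor
      · intro x hx; exact absurd hx (by simp)
      · intro _ y hy1 hy2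
        have := dsN_le (hn + 1) y hy2
        omega
    · rw [bMinAtLeast_succ hn b0 s hs9]
      -- abbreviations
      set top := b0 / 10 ^ hn with htopdef
      set rest := b0 % 10 ^ hn with hrestdef
      have hrlt : rest < 10 ^ hn := Nat.mod_lt b0 (by positivity)
      have htop9 : top ≤ 9 := by
        have : b0 < 10 * 10 ^ hn := by
          calc b0 < 10 ^ (hn + 1) := hb
          _ = 10 * 10 ^ hn := by ring
        have := (Nat.div_lt_iff_lt_mul (show 0 < 10 ^ hn by positivity)).mpr
          (by omega : b0 < 10 * 10 ^ hn)
        omega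
      have hb0eq : b0 = top * 10 ^ hn + rest := (Nat.div_add_mod' b0 (10 ^ hn)).symm
      have hpow : (10:Nat) ^ (hn + 1) = 10 * 10 ^ hn := by ring
      have hppos : (0:Nat) < 10 ^ hn := by positivity
      -- facts about any y in the h = hn+1 range
      by_cases htops : top ≤ s
      · have harg : ((s : Int) - ↑top) = ((s - top : Nat) : Int) := by push_cast; omega
        rw [harg]
        obtain ⟨IH1, IH2⟩ := ih rest (s - top) hrlt
        rcases hrec : bMinAtLeast (↑rest) (↑hn) ((s - top : Nat) : Int) with _ | r
        · -- tight completion impossible: go to the d branch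
          have hnone : ∀ y : Nat, rest ≤ y → y < 10 ^ hn → dsN y ≠ s - top := IH2 hrec
          -- the chosen top digit dn and its properties
          obtain ⟨dn, hdeq, hdgt, hdlow, hdmin⟩ :
              ∃ dn : Nat,
                (if ((top:Int)) + 1 > (s:Int) - 9 * (hn:Int) then ((top:Int)) + 1
                  else (s:Int) - 9 * (hn:Int)) = (dn:Int) ∧
                top < dn ∧ s ≤ dn + 9 * hn ∧
                (∀ e : Nat, top < e → s ≤ e + 9 * hn → dn ≤ e) := by
            by_cases hc : ((top:Int)) + 1 > (s:Int) - 9 * (hn:Int)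
            · refine ⟨top + 1, by rw [if_pos hc]; push_cast; ring, by omega, ?_, ?_⟩
              · have h1 : (s:Int) - 9 * (hn:Int) < (top:Int) + 1 := hc
                have h2 : (s:Int) ≤ (top:Int) + 9 * (hn:Int) := by omega
                have h3 : s ≤ top + 9 * hn := by exact_mod_cast h2
                omega
              · intro e he _; omega
            · push_neg at hc
              have hsgt : 9 * hn < s := by
                have h1 : ((top:Int)) + 1 ≤ (s:Int) - 9 * (hn:Int) := hc
                have h2 : (0:Int) ≤ (top:Int) := by positivity
                have h3 : 9 * (hn:Int) < (s:Int) := by omega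
                exact_mod_cast h3
              refine ⟨s - 9 * hn, by rw [if_neg (by push_neg; exact hc)]; push_cast; omega,
                ?_, by omega, ?_⟩
              · have h1 : ((top:Int)) + 1 ≤ (s:Int) - 9 * (hn:Int) := hc
                have h3 : (top:Int) < (s:Int) - 9 * (hn:Int) := by omega
                have h4 : ((top:Nat):Int) < ((s - 9 * hn : Nat) : Int) := by push_cast; omega
                exact_mod_cast h4
              · intro e _ he2; omega
          dsimp only
          rw [hdeq]
          by_cases hcond : dn ≤ 9 ∧ dn ≤ s
          · rw [if_pos (by exact_mod_cast hcond)]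
            have hsub : (s:Int) - (dn:Int) = ((s - dn : Nat) : Int) := by
              push_cast; omega
            rw [hsub]
            obtain ⟨m, hm1, hm2, hm3, hm4⟩ := bMinSum_spec hn (s - dn) (by omega)
            rw [hm1]
            constructor
            · intro x hx
              have hxval : x = (dn:Int) * ((10 ^ hn : Nat) : Int) + (m:Int) :=
                (Option.some.inj hx).symm
              refine ⟨dn * 10 ^ hn + m, ?_, ?_, ?_, ?_, ?_⟩
              · rw [hxval]; push_cast; ring
              · have hmul : (top + 1) * 10 ^ hn ≤ dn * 10 ^ hn :=
                  Nat.mul_le_mul_right _ (by omega)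
                have hexp : (top + 1) * 10 ^ hn = top * 10 ^ hn + 10 ^ hn := by ring
                omega
              · have hmul : (dn + 1) * 10 ^ hn ≤ 10 * 10 ^ hn :=
                  Nat.mul_le_mul_right _ (by omega)
                have hexp : (dn + 1) * 10 ^ hn = dn * 10 ^ hn + 10 ^ hn := by ring
                omega
              · rw [dsN_split hn dn m hm2, dsN_small dn (by omega)]; omega
              · intro y hy1 hy2
                have hylt : y < 10 ^ (hn + 1) := by
                  have hmul : (dn + 1) * 10 ^ hn ≤ 10 * 10 ^ hn :=
                    Nat.mul_le_mul_right _ (by omega)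
                  have hexp : (dn + 1) * 10 ^ hn = dn * 10 ^ hn + 10 ^ hn := by ring
                  omega
                obtain ⟨hysplit, hyt9⟩ := split_digit hn y hylt
                have hyt_ge : top ≤ y / 10 ^ hn := by
                  have := Nat.div_le_div_right (c := 10 ^ hn) hy1
                  omega
                have hymod := Nat.div_add_mod' y (10 ^ hn)
                have hymlt : y % 10 ^ hn < 10 ^ hn := Nat.mod_lt y hppos
                have hyt_le : y / 10 ^ hn ≤ dn := by
                  have h2 : y < (dn + 1) * 10 ^ hn := by
                    have hexp : (dn + 1) * 10 ^ hn = dn * 10 ^ hn + 10 ^ hn := by ring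
                    omega
                  have := (Nat.div_lt_iff_lt_mul hppos).mpr h2
                  omega
                rcases Nat.lt_or_ge (y / 10 ^ hn) dn with hlt | hge
                · rcases Nat.eq_or_lt_of_le hyt_ge with heq | hgt
                  · -- same top digit as b0: tight region
                    have hyr_ge : rest ≤ y % 10 ^ hn := by
                      rw [heq] at hb0eq
                      omega
                    have := hnone (y % 10 ^ hn) hyr_ge hymlt
                    omega
                  · -- strictly between top and dn: infeasible remainder
                    intro hds
                    have hru := dsN_le hn (y % 10 ^ hn) hymlt
                    have := hdmin (y / 10 ^ hn) hgt (by omega)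
                    omega
                · have hyt : y / 10 ^ hn = dn := by omega
                  have hyr_lt : y % 10 ^ hn < m := by
                    rw [hyt] at hymod
                    omega
                  have := hm4 (y % 10 ^ hn) hyr_lt
                  rw [hyt] at hysplit
                  omega
            · intro hx; exact absurd hx (by simp)
          · rw [if_neg (by exact_mod_cast hcond)]
            constructor
            · intro x hx; exact absurd hx (by simp)
            · intro _ y hy1 hy2
              obtain ⟨hysplit, hyt9⟩ := split_digit hn y hy2
              have hyt_ge : top ≤ y / 10 ^ hn := by
                have := Nat.div_le_div_right (c := 10 ^ hn) hy1
                omega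
              have hymlt : y % 10 ^ hn < 10 ^ hn := Nat.mod_lt y hppos
              have hymod := Nat.div_add_mod' y (10 ^ hn)
              rcases Nat.eq_or_lt_of_le hyt_ge with heq | hgt
              · have hyr_ge : rest ≤ y % 10 ^ hn := by
                  rw [heq] at hb0eq
                  omega
                have := hnone (y % 10 ^ hn) hyr_ge hymlt
                omega
              · intro hds
                have hru := dsN_le hn (y % 10 ^ hn) hymlt
                have := hdmin (y / 10 ^ hn) hgt (by omega)
                omega
        · -- tight completion exists
          obtain ⟨rn, hr1, hr2, hr3, hr4, hr5⟩ := IH1 r hrec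
          dsimp only
          constructor
          · intro x hx
            have hxval : x = (top:Int) * ((10 ^ hn : Nat) : Int) + r :=
              (Option.some.inj hx).symm
            refine ⟨top * 10 ^ hn + rn, ?_, ?_, ?_, ?_, ?_⟩
            · rw [hxval, hr1]; push_cast; ring
            · omega
            · have hmul : (top + 1) * 10 ^ hn ≤ 10 * 10 ^ hn :=
                Nat.mul_le_mul_right _ (by omega)
              have hexp : (top + 1) * 10 ^ hn = top * 10 ^ hn + 10 ^ hn := by ring
              omega
            · rw [dsN_split hn top rn hr3, dsN_small top (by omega)]; omega
            · intro y hy1 hy2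
              have hylt : y < 10 ^ (hn + 1) := by
                have hmul : (top + 1) * 10 ^ hn ≤ 10 * 10 ^ hn :=
                  Nat.mul_le_mul_right _ (by omega)
                have hexp : (top + 1) * 10 ^ hn = top * 10 ^ hn + 10 ^ hn := by ring
                omega
              obtain ⟨hysplit, hyt9⟩ := split_digit hn y hylt
              have hyt_ge : top ≤ y / 10 ^ hn := by
                have := Nat.div_le_div_right (c := 10 ^ hn) hy1
                omega
              have hymod := Nat.div_add_mod' y (10 ^ hn)
              have hymlt : y % 10 ^ hn < 10 ^ hn := Nat.mod_lt y hppos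
              have hyt_le : y / 10 ^ hn ≤ top := by
                have h2 : y < (top + 1) * 10 ^ hn := by
                  have hexp : (top + 1) * 10 ^ hn = top * 10 ^ hn + 10 ^ hn := by ring
                  omega
                have := (Nat.div_lt_iff_lt_mul hppos).mpr h2
                omega
              have hyt : y / 10 ^ hn = top := by omega
              rw [hyt] at hymod hysplit
              have hyr_ge : rest ≤ y % 10 ^ hn := by omega
              have hyr_lt : y % 10 ^ hn < rn := by omega
              have := hr5 (y % 10 ^ hn) hyr_ge hyr_lt
              omega
          · intro hx; exact absurd hx (by simp)
      · -- top digit of b0 already exceeds s: no candidate at all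
        push_neg at htops
        have harg : ((s : Int) - (top:Int)) < 0 := by
          have : (top:Int) > (s:Int) := by exact_mod_cast htops
          omega
        rw [bMinAtLeast_neg _ _ _ harg]
        dsimp only
        have hiffalse : ¬((if ((top:Int)) + 1 > (s:Int) - 9 * (hn:Int) then ((top:Int)) + 1
            else (s:Int) - 9 * (hn:Int)) ≤ 9 ∧
            (if ((top:Int)) + 1 > (s:Int) - 9 * (hn:Int) then ((top:Int)) + 1
            else (s:Int) - 9 * (hn:Int)) ≤ (s:Int)) := by
          have hc : ((top:Int)) + 1 > (s:Int) - 9 * (hn:Int) := by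
            have h1 : (s:Int) < (top:Int) := by exact_mod_cast htops
            have h2 : (0:Int) ≤ 9 * (hn:Int) := by positivity
            omega
          rw [if_pos hc]
          intro ⟨_, h2⟩
          have h1 : (s:Int) < (top:Int) := by exact_mod_cast htops
          omega
        rw [if_neg hiffalse]
        constructor
        · intro x hx; exact absurd hx (by simp)
        · intro _ y hy1 hy2
          obtain ⟨hysplit, hyt9⟩ := split_digit hn y hy2
          have hyt_ge : top ≤ y / 10 ^ hn := by
            have := Nat.div_le_div_right (c := 10 ^ hn) hy1
            omega
          omega
-- A's loop-body test as a single boolean predicate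
def aChk (n : Int) : Bool :=
  let length := func_b n
  if PySem.Int.mod length 2 ≠ 0 then false
  else
    let divisor := func_a (PySem.Int.floordiv length 2)
    decide (func_c (PySem.Int.floordiv n divisor) = func_c (PySem.Int.mod n divisor))

theorem solLoop_succ (num nxt : Int) (fuel : Nat) :
    solLoop num nxt (fuel + 1) =
      if aChk (nxt + 1) then (nxt + 1) - num else solLoop num (nxt + 1) fuel := by
  rw [solLoop]
  simp only [aChk]
  by_cases h1 : PySem.Int.mod (func_b (nxt + 1)) 2 ≠ 0
  · rw [if_pos h1, if_pos h1]
    simp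
  · rw [if_neg h1, if_neg h1]
    by_cases h2 : func_c (PySem.Int.floordiv (nxt + 1) (func_a (PySem.Int.floordiv (func_b (nxt + 1)) 2))) =
        func_c (PySem.Int.mod (nxt + 1) (func_a (PySem.Int.floordiv (func_b (nxt + 1)) 2)))
    · rw [if_pos h2, if_pos (by rw [decide_eq_true_eq]; exact h2 : decide (func_c (PySem.Int.floordiv (nxt + 1) (func_a (PySem.Int.floordiv (func_b (nxt + 1)) 2))) =
        func_c (PySem.Int.mod (nxt + 1) (func_a (PySem.Int.floordiv (func_b (nxt + 1)) 2)))) = true)]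
    · rw [if_neg h2, if_neg (by rw [decide_eq_true_eq]; exact h2 : ¬ decide (func_c (PySem.Int.floordiv (nxt + 1) (func_a (PySem.Int.floordiv (func_b (nxt + 1)) 2))) =
        func_c (PySem.Int.mod (nxt + 1) (func_a (PySem.Int.floordiv (func_b (nxt + 1)) 2)))) = true)]

theorem solLoop_run (num N : Int) (hP : aChk N = true) :
    ∀ (fuel : Nat) (nxt : Int), nxt < N → (N - nxt).toNat ≤ fuel →
      (∀ m : Int, nxt < m → m < N → aChk m = false) →
      solLoop num nxt fuel = N - num := by
  intro fuel
  induction fuel with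
  | zero =>
    intro nxt h1 h2 _
    exfalso; omega
  | succ f ihf =>
    intro nxt h1 h2 hmin
    rw [solLoop_succ]
    by_cases he : nxt + 1 = N
    · rw [he, hP]; simp
    · have hlt : nxt + 1 < N := by omega
      have hfalse : aChk (nxt + 1) = false := hmin _ (by omega) hlt
      rw [hfalse]
      simp only [Bool.false_eq_true, if_false]
      exact ihf (nxt + 1) hlt (by omega) (fun m hm1 hm2 => hmin m (by omega) hm2)

theorem func_a_zero : func_a 0 = 1 := by
  rw [func_a, funcALoop]; norm_num

theorem aChk_nonpos (n : Int) (h : n ≤ 0) : aChk n = true := by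
  simp only [aChk]
  rw [func_b_nonpos n h]
  have h1 : PySem.Int.mod 0 2 = 0 := by decide
  have h2 : PySem.Int.floordiv 0 2 = 0 := by decide
  rw [h1, h2, func_a_zero]
  have h3 : PySem.Int.floordiv n 1 = n := by
    rw [PySem.Int.floordiv_eq_ediv_of_pos (by norm_num)]; exact Int.ediv_one n
  have h4 : PySem.Int.mod n 1 = 0 := by
    rw [PySem.Int.mod_eq_emod_of_pos (by norm_num)]; exact Int.emod_one n
  rw [h3, h4, func_c_nonpos n h, func_c_nonpos 0 (by norm_num)]
  simp

-- the same test, expressed over ℕ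
def natBal (m : Nat) : Prop :=
  lenN m % 2 = 0 ∧ dsN (m / 10 ^ (lenN m / 2)) = dsN (m % 10 ^ (lenN m / 2))

theorem aChk_natCast (m : Nat) : aChk (↑m) = true ↔ natBal m := by
  simp only [aChk, natBal]
  rw [func_b_natCast]
  have h2 : PySem.Int.mod (↑(lenN m)) 2 = ((lenN m % 2 : Nat) : Int) := by
    exact_mod_cast PySem.Int.mod_natCast (lenN m) 2
  have h3 : PySem.Int.floordiv (↑(lenN m)) 2 = ((lenN m / 2 : Nat) : Int) := by
    exact_mod_cast PySem.Int.floordiv_natCast (lenN m) 2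
  rw [h2, h3, func_a_natCast]
  have h4 : PySem.Int.floordiv (↑m) ((10 ^ (lenN m / 2) : Nat) : Int) =
      ((m / 10 ^ (lenN m / 2) : Nat) : Int) := PySem.Int.floordiv_natCast _ _
  have h5 : PySem.Int.mod (↑m) ((10 ^ (lenN m / 2) : Nat) : Int) =
      ((m % 10 ^ (lenN m / 2) : Nat) : Int) := PySem.Int.mod_natCast _ _
  rw [h4, h5, func_c_natCast, func_c_natCast]
  by_cases hpar : lenN m % 2 = 0
  · have h0 : ¬ ((lenN m % 2 : Nat) : Int) ≠ 0 := by simp [hpar]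
    rw [if_neg h0]
    simp [hpar]
  · have h0 : ((lenN m % 2 : Nat) : Int) ≠ 0 := by exact_mod_cast hpar
    rw [if_pos h0]
    simp only [Bool.false_eq_true, false_iff]
    intro hcon
    exact hpar hcon.1
theorem dsN_pow10 (k : Nat) : dsN (10 ^ k) = 1 := by
  have h := dsN_split k 1 0 (by positivity)
  simpa [dsN_zero, dsN_small 1 (by norm_num)] using h

theorem divmod_decomp (a b p : Nat) (hp : 0 < p) (hb : b < p) :
    (a * p + b) / p = a ∧ (a * p + b) % p = b := by
  constructor
  · rw [Nat.mul_comm a p, Nat.mul_add_div hp, Nat.div_eq_of_lt hb]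
    omega
  · rw [Nat.mul_comm a p, Nat.mul_add_mod, Nat.mod_eq_of_lt hb]

theorem lenN_le_of_lt (n k : Nat) (h : n < 10 ^ k) : lenN n ≤ k := by
  by_contra hc
  push_neg at hc
  rcases Nat.eq_zero_or_pos n with h0 | h0
  · rw [h0, lenN_zero] at hc; omega
  · have h1 : 10 ^ k ≤ 10 ^ (lenN n - 1) := Nat.pow_le_pow_right (by norm_num) (by omega)
    have h2 := lenN_pow_le n h0
    omega

theorem lenN_pow (k : Nat) : lenN (10 ^ k) = k + 1 := by
  apply lenN_unique _ _ (by omega)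
  · simp
  · have h0 : (0:Nat) < 10 ^ k := by positivity
    have he : (10:Nat) ^ (k + 1) = 10 ^ k * 10 := by ring
    omega

theorem natBal_iff_of_len (y h : Nat) (hy : lenN y = 2 * h) :
    natBal y ↔ dsN (y / 10 ^ h) = dsN (y % 10 ^ h) := by
  unfold natBal
  rw [hy]
  have h1 : 2 * h % 2 = 0 := by omega
  have h2 : 2 * h / 2 = h := by omega
  rw [h1, h2]
  exact ⟨fun ⟨_, hb⟩ => hb, fun hb => ⟨rfl, hb⟩⟩

theorem natBal_odd (n : Nat) (h : lenN n % 2 = 1) : ¬ natBal n := by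
  intro hb
  have := hb.1
  omega

theorem lenN_mid (a b h : Nat) (h1 : 1 ≤ h) (ha1 : 10 ^ (h - 1) ≤ a) (ha2 : a < 10 ^ h)
    (hb : b < 10 ^ h) : lenN (a * 10 ^ h + b) = 2 * h := by
  apply lenN_unique _ _ (by omega)
  · have he : 10 ^ (2 * h - 1) = 10 ^ (h - 1) * 10 ^ h := by
      rw [← pow_add]
      congr 1
      omega
    rw [he]
    have := Nat.mul_le_mul_right (10 ^ h) ha1
    omega
  · have he : (10:Nat) ^ (2 * h) = 10 ^ h * 10 ^ h := by
      rw [← pow_add]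
      congr 1
      omega
    have h3 : (a + 1) * 10 ^ h ≤ 10 ^ h * 10 ^ h := by
      rw [Nat.mul_comm (10 ^ h) (10 ^ h)]
      exact Nat.mul_le_mul_right _ (by omega)
    have h4 : (a + 1) * 10 ^ h = a * 10 ^ h + 10 ^ h := by ring
    omega

theorem balanced_mid (a b h : Nat) (h1 : 1 ≤ h) (ha1 : 10 ^ (h - 1) ≤ a) (ha2 : a < 10 ^ h)
    (hb : b < 10 ^ h) : natBal (a * 10 ^ h + b) ↔ dsN a = dsN b := by
  rw [natBal_iff_of_len _ h (lenN_mid a b h h1 ha1 ha2 hb)]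
  obtain ⟨hd, hm⟩ := divmod_decomp a b (10 ^ h) (by positivity) hb
  rw [hd, hm]
theorem alt_correct (num : Int) (lon : Nat) (hlon : 1 ≤ lon) (hnum : num + 1 = ↑lon) :
    ∃ N : Nat, lon ≤ N ∧ N ≤ 10 * 10 ^ lenN lon + 1 ∧ natBal N ∧
      (∀ y : Nat, lon ≤ y → y < N → ¬ natBal y) ∧ solution_alt num = ↑N - num := by
  have hlonI : (1:Int) ≤ ↑lon := by exact_mod_cast hlon
  have hneg : ¬ (num + 1 ≤ 0) := by omega
  set L := lenN lon with hLdef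
  have hL1 : 1 ≤ L := lenN_pos lon (by omega)
  have hlow : 10 ^ (L - 1) ≤ lon := lenN_pow_le lon (by omega)
  have hhigh : lon < 10 ^ L := lenN_lt_pow lon
  simp only [solution_alt, hnum]
  rw [if_neg (by omega : ¬ ((lon:Int) ≤ 0))]
  rw [bLen_natCast]
  have hmod2 : PySem.Int.mod (↑L) 2 = ((L % 2 : Nat) : Int) := by
    exact_mod_cast PySem.Int.mod_natCast L 2
  rw [hmod2]
  by_cases hpar : L % 2 = 1
  · -- odd length: jump to 10^L + 1
    rw [if_pos (by exact_mod_cast hpar)]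
    rw [Int.toNat_natCast]
    set N := 10 ^ L + 1 with hNdef
    have hhalf : L = 2 * (L / 2) + 1 := by omega
    have hsplitpow : 10 ^ (L / 2) * 10 ^ (L / 2 + 1) = 10 ^ L := by
      rw [← pow_add]
      congr 1
      omega
    have hb1lt : (1:Nat) < 10 ^ (L / 2 + 1) := by
      have : (10:Nat) ^ 1 ≤ 10 ^ (L / 2 + 1) := Nat.pow_le_pow_right (by norm_num) (by omega)
      simpa using by omega
    refine ⟨N, by omega, by omega, ?_, ?_, ?_⟩
    · have hkey := balanced_mid (10 ^ (L / 2)) 1 (L / 2 + 1) (by omega)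
        (by simp) (by
          have h0 : (0:Nat) < 10 ^ (L / 2) := by positivity
          have he : (10:Nat) ^ (L / 2 + 1) = 10 ^ (L / 2) * 10 := by ring
          omega) hb1lt
      rw [hsplitpow] at hkey
      rw [hNdef, hkey, dsN_pow10, dsN_small 1 (by norm_num)]
    · intro y hy1 hy2
      by_cases hyl : y < 10 ^ L
      · have hylen : lenN y = L := lenN_unique y L hL1 (le_trans hlow hy1) hyl
        exact natBal_odd y (by rw [hylen]; omega)
      · have hyeq : y = 10 ^ L := by omega
        subst hyeq
        have hylen : lenN (10 ^ L) = 2 * (L / 2 + 1) := by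
          rw [lenN_pow]; omega
        rw [natBal_iff_of_len _ _ hylen]
        have hdec := divmod_decomp (10 ^ (L / 2)) 0 (10 ^ (L / 2 + 1)) (by positivity)
          (by positivity)
        rw [Nat.add_zero] at hdec
        rw [hsplitpow] at hdec
        rw [hdec.1, hdec.2, dsN_pow10, dsN_zero]
        omega
    · rw [hNdef]
      push_cast
      ring
  · -- even length
    have hL2 : L % 2 = 0 := by omega
    rw [if_neg (by
      intro hcon
      have : L % 2 = 1 := by exact_mod_cast hcon
      omega)]
    have hdiv2 : PySem.Int.floordiv (↑L) 2 = ((L / 2 : Nat) : Int) := by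
      exact_mod_cast PySem.Int.floordiv_natCast L 2
    rw [hdiv2, Int.toNat_natCast]
    set h := L / 2 with hhdef
    have hh1 : 1 ≤ h := by omega
    have hLh : L = 2 * h := by omega
    have hcastp : (10:Int) ^ h = ((10 ^ h : Nat) : Int) := by push_cast; ring
    rw [hcastp]
    rw [PySem.Int.floordiv_natCast lon (10 ^ h), PySem.Int.mod_natCast lon (10 ^ h)]
    rw [bDsum_natCast]
    set front := lon / 10 ^ h with hfrontdef
    set b0 := lon % 10 ^ h with hb0def
    set s := dsN front with hsdef
    have hppos : (0:Nat) < 10 ^ h := by positivity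
    have hLL : (10:Nat) ^ L = 10 ^ h * 10 ^ h := by
      rw [← pow_add]; congr 1; omega
    have hL1e : (10:Nat) ^ (L - 1) = 10 ^ (h - 1) * 10 ^ h := by
      rw [← pow_add]; congr 1; omega
    have hfr1 : 10 ^ (h - 1) ≤ front := by
      rw [hfrontdef, Nat.le_div_iff_mul_le hppos]
      omega
    have hfr2 : front < 10 ^ h := by
      rw [hfrontdef, Nat.div_lt_iff_lt_mul hppos]
      omega
    have hb0lt : b0 < 10 ^ h := Nat.mod_lt lon hppos
    have hlon_eq : lon = front * 10 ^ h + b0 := (Nat.div_add_mod' lon (10 ^ h)).symm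
    obtain ⟨SP1, SP2⟩ := bMinAtLeast_spec h b0 s hb0lt
    rcases hmb : bMinAtLeast (↑b0) (↑h) (↑s) with _ | back
    · -- no completion with the current front half
      have htot := SP2 hmb
      dsimp only
      by_cases hov : front + 1 = 10 ^ h
      · rw [if_pos (by exact_mod_cast hov : ((front:Nat):Int) + 1 = ((10 ^ h : Nat) : Int))]
        have ht1 : ((L:Int) + 1).toNat = L + 1 := by omega
        rw [ht1]
        set N := 10 ^ (L + 1) + 1 with hNdef
        have hsplitpow : 10 ^ h * 10 ^ (h + 1) = 10 ^ (L + 1) := by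
          rw [← pow_add]; congr 1; omega
        have hb1lt : (1:Nat) < 10 ^ (h + 1) := by
          have : (10:Nat) ^ 1 ≤ 10 ^ (h + 1) := Nat.pow_le_pow_right (by norm_num) (by omega)
          simpa using by omega
        have hbound : N = 10 * 10 ^ L + 1 := by
          rw [hNdef, pow_succ]; ring_nf
        refine ⟨N, by omega, by omega, ?_, ?_, ?_⟩
        · have hkey := balanced_mid (10 ^ h) 1 (h + 1) (by omega)
            (by simp) (by
              have h0 : (0:Nat) < 10 ^ h := by positivity
              have he : (10:Nat) ^ (h + 1) = 10 ^ h * 10 := by ring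
              omega) hb1lt
          rw [hsplitpow] at hkey
          rw [hNdef, hkey, dsN_pow10, dsN_small 1 (by norm_num)]
        · intro y hy1 hy2
          by_cases hy3 : y < 10 ^ L
          · have hylen : lenN y = 2 * h := by
              rw [← hLh]
              exact lenN_unique y L hL1 (le_trans hlow hy1) hy3
            rw [natBal_iff_of_len _ _ hylen]
            have hyt_ge : front ≤ y / 10 ^ h := by
              have := Nat.div_le_div_right (c := 10 ^ h) hy1
              omega
            have hyt_lt : y / 10 ^ h < 10 ^ h := by
              rw [Nat.div_lt_iff_lt_mul hppos]; omega
            have hyt : y / 10 ^ h = front := by omega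
            have hymod := Nat.div_add_mod' y (10 ^ h)
            rw [hyt] at hymod
            have hyr_ge : b0 ≤ y % 10 ^ h := by omega
            have hymlt : y % 10 ^ h < 10 ^ h := Nat.mod_lt y hppos
            have := htot (y % 10 ^ h) hyr_ge hymlt
            rw [hyt]
            omega
          · by_cases hy4 : y < 10 ^ (L + 1)
            · have hylen : lenN y = L + 1 :=
                lenN_unique y (L + 1) (by omega) (by simpa using hy3) hy4
              exact natBal_odd y (by rw [hylen]; omega)
            · have hyeq : y = 10 ^ (L + 1) := by omega
              subst hyeq
              have hylen : lenN (10 ^ (L + 1)) = 2 * (h + 1) := by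
                rw [lenN_pow]; omega
              rw [natBal_iff_of_len _ _ hylen]
              have hdec := divmod_decomp (10 ^ h) 0 (10 ^ (h + 1)) (by positivity)
                (by positivity)
              rw [Nat.add_zero] at hdec
              rw [hsplitpow] at hdec
              rw [hdec.1, hdec.2, dsN_pow10, dsN_zero]
              omega
        · rw [hNdef]
          push_cast
          ring
      · rw [if_neg (by
          intro hcon
          exact hov (by exact_mod_cast hcon))]
        have hfr1' : front + 1 < 10 ^ h := by omega
        have hs1 : dsN (front + 1) ≤ 9 * h := dsN_le h (front + 1) hfr1'
        obtain ⟨m, hm1, hm2, hm3, hm4⟩ := bMinSum_spec h (dsN (front + 1)) hs1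
        have hcast1 : ((front:Nat):Int) + 1 = ((front + 1 : Nat) : Int) := by push_cast; ring
        rw [hcast1, bDsum_natCast, hm1]
        set N := (front + 1) * 10 ^ h + m with hNdef
        have hNlt : N < 10 ^ L := by
          have hmul : (front + 1 + 1) * 10 ^ h ≤ 10 ^ h * 10 ^ h :=
            by rw [Nat.mul_comm (10 ^ h) (10 ^ h)]
               exact Nat.mul_le_mul_right _ (by omega)
          have hexp : (front + 1 + 1) * 10 ^ h = (front + 1) * 10 ^ h + 10 ^ h := by ring
          omega
        have hfsucc : (front + 1) * 10 ^ h = front * 10 ^ h + 10 ^ h := by ring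
        refine ⟨N, by omega, by omega, ?_, ?_, ?_⟩
        · rw [hNdef, balanced_mid (front + 1) m h hh1 (by omega) hfr1' hm2]
          exact hm3.symm ▸ rfl
        · intro y hy1 hy2
          have hylen : lenN y = 2 * h := by
            rw [← hLh]
            exact lenN_unique y L hL1 (le_trans hlow hy1) (by omega)
          rw [natBal_iff_of_len _ _ hylen]
          have hyt_ge : front ≤ y / 10 ^ h := by
            have := Nat.div_le_div_right (c := 10 ^ h) hy1
            omega
          have hyt_le : y / 10 ^ h ≤ front + 1 := by
            have hlt : y < (front + 1 + 1) * 10 ^ h := by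
              have : (front + 1 + 1) * 10 ^ h = (front + 1) * 10 ^ h + 10 ^ h := by ring
              omega
            have := (Nat.div_lt_iff_lt_mul hppos).mpr hlt
            omega
          have hymod := Nat.div_add_mod' y (10 ^ h)
          have hymlt : y % 10 ^ h < 10 ^ h := Nat.mod_lt y hppos
          rcases Nat.eq_or_lt_of_le hyt_le with hyt | hyt
          · -- top half is front + 1: remainder below the minimal completion
            rw [hyt] at hymod ⊢
            have hyr_lt : y % 10 ^ h < m := by omega
            have := hm4 (y % 10 ^ h) hyr_lt
            omega
          · have hyt' : y / 10 ^ h = front := by omega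
            rw [hyt'] at hymod ⊢
            have hyr_ge : b0 ≤ y % 10 ^ h := by omega
            have := htot (y % 10 ^ h) hyr_ge hymlt
            omega
        · rw [hNdef]
          push_cast
          ring
    · -- completion with the current front half exists
      obtain ⟨bn, hb1, hb2, hb3, hb4, hb5⟩ := SP1 back hmb
      dsimp only
      set N := front * 10 ^ h + bn with hNdef
      have hNlt : N < 10 ^ L := by
        have hmul : (front + 1) * 10 ^ h ≤ 10 ^ h * 10 ^ h := by
          rw [Nat.mul_comm (10 ^ h) (10 ^ h)]
          exact Nat.mul_le_mul_right _ (by omega)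
        have hexp : (front + 1) * 10 ^ h = front * 10 ^ h + 10 ^ h := by ring
        omega
      refine ⟨N, by omega, by omega, ?_, ?_, ?_⟩
      · rw [hNdef, balanced_mid front bn h hh1 hfr1 hfr2 hb3]
        omega
      · intro y hy1 hy2
        have hylen : lenN y = 2 * h := by
          rw [← hLh]
          exact lenN_unique y L hL1 (le_trans hlow hy1) (by omega)
        rw [natBal_iff_of_len _ _ hylen]
        have hyt_ge : front ≤ y / 10 ^ h := by
          have := Nat.div_le_div_right (c := 10 ^ h) hy1
          omega
        have hyt_le : y / 10 ^ h ≤ front := by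
          have hlt : y < (front + 1) * 10 ^ h := by
            have : (front + 1) * 10 ^ h = front * 10 ^ h + 10 ^ h := by ring
            omega
          have := (Nat.div_lt_iff_lt_mul hppos).mpr hlt
          omega
        have hyt : y / 10 ^ h = front := by omega
        have hymod := Nat.div_add_mod' y (10 ^ h)
        rw [hyt] at hymod
        have hyr_ge : b0 ≤ y % 10 ^ h := by omega
        have hyr_lt : y % 10 ^ h < bn := by omega
        have := hb5 (y % 10 ^ h) hyr_ge hyr_lt
        rw [hyt]
        omega
      · rw [hNdef, hb1]
        push_cast
        ring
-- ===== VERDICT (by name: the statement is the Claim_ definition above) =====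
theorem solution_spec : Claim_equal_solution := by
  unfold Claim_equal_solution
  intro num hdom
  unfold Spec_solution
  obtain ⟨hd1, hd2⟩ : -2147483648 ≤ num ∧ num ≤ 2147483648 := by
    simpa [Dom_solution, pvDomInt] using hdom
  have h12 : (10:Int) ^ 12 = 1000000000000 := by norm_num
  unfold solution
  by_cases hneg : num + 1 ≤ 0
  · have hrun := solLoop_run num (num + 1) (aChk_nonpos (num + 1) hneg)
      (((10:Int) ^ 12 - num).toNat) num (by omega) (by omega)
      (fun m hm1 hm2 => absurd hm1 (by omega))
    rw [hrun]
    simp only [solution_alt]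
    rw [if_pos (by omega : num + 1 ≤ 0)]
    omega
  · set lon := (num + 1).toNat with hlondef
    have hnum : num + 1 = ↑lon := by omega
    have hlon1 : 1 ≤ lon := by omega
    obtain ⟨N, hN1, hN2, hN3, hN4, hN5⟩ := alt_correct num lon hlon1 hnum
    have hlen10 : lenN lon ≤ 10 := lenN_le_of_lt lon 10 (by
      have h1 : lon ≤ 2147483649 := by omega
      have h2 : (10:Nat) ^ 10 = 10000000000 := by norm_num
      omega)
    have hpow10 : (10:Nat) ^ lenN lon ≤ 10000000000 := by
      have h1 : (10:Nat) ^ lenN lon ≤ 10 ^ 10 := Nat.pow_le_pow_right (by norm_num) hlen10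
      have h2 : (10:Nat) ^ 10 = 10000000000 := by norm_num
      omega
    have hNb : N ≤ 100000000001 := by omega
    have hNbI : (N:Int) ≤ 100000000001 := by exact_mod_cast hNb
    have hlonN : (lon:Int) ≤ (N:Int) := by exact_mod_cast hN1
    have hrun := solLoop_run num (↑N) (by rw [aChk_natCast]; exact hN3)
      (((10:Int) ^ 12 - num).toNat) num (by omega) (by omega)
      (by
        intro m hm1 hm2
        have hm0 : 1 ≤ m := by omega
        have hmeq : m = ↑(m.toNat) := by omega
        have hlom : lon ≤ m.toNat := by omega
        have hmN : m.toNat < N := by omega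
        have hnb := hN4 m.toNat hlom hmN
        rw [hmeq]
        cases hb : aChk (↑(m.toNat) : Int) with
        | false => rfl
        | true => exact absurd ((aChk_natCast _).mp hb) hnb)
    rw [hrun, hN5]
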